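-- pv_equiv track=rewrite | github.com/pypi-data/pypi-mirror-249 | packages/muvinai/muvinai-0.2.61.dev2-py3-none-any.whl/muvinai/utilities/facturacion_afip.py | process_razon_social
-- ===== SOURCE A (Python) =====
-- def process_razon_social (rz: str, limit_long: str):
--     first_row = ''
--     second_row = ''
--     if len(rz) > limit_long:
--         rz_list = rz.split(' ')
--         long_string = 0
--         for word in rz_list:
--             long_string += len(word)
--             if long_string <= limit_long:
--                 first_row = first_row + word + ' '
--             else:
--                 second_row = second_row + word + ' '
--     else:
--         first_row = rz
--     return [first_row, second_row]
-- ===== SOURCE B (Python) =====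
-- def process_razon_social(rz: str, limit_long: str):
--     if len(rz) <= limit_long:
--         return [rz, '']
--     words = rz.split(' ')
--     total = 0
--     cut = len(words)
--     for i, w in enumerate(words):
--         total += len(w)
--         if total > limit_long:
--             cut = i
--             break
--     head, tail = words[:cut], words[cut:]
--     def row(part):
--         return ' '.join(part) + ' ' if part else ''
--     return [row(head), row(tail)]
-- ===== Notes on version B (the rewrite author's own statement) =====
-- stated objective: alternative
-- what changed: Instead of accumulating two strings word by word with a running-length branch, B finds the single boundary index where the cumulative word length first exceeds the limit (the sum is monotone), slices the word list into head/tail there, and builds each row with one ' '.join plus a trailing space.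
import Mathlib
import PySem

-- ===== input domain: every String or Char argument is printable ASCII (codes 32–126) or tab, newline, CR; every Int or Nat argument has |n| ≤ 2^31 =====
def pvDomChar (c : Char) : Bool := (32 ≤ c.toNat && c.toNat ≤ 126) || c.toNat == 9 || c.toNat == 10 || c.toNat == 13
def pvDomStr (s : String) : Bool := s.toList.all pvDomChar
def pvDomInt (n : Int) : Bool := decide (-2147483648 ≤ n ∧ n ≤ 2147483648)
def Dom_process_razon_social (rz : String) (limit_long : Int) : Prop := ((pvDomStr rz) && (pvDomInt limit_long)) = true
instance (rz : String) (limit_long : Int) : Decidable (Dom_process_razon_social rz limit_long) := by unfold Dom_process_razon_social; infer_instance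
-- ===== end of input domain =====

-- B replaces A's per-word branch-and-concatenate loop by finding the boundary index where the
-- cumulative word length first exceeds the limit, slicing the word list there and joining each part.

-- ===== PORT A =====
-- literal port of A; strings are carried as List Char (PySem.Chars) and packed with String.ofList at the end
def process_razon_social (rz : String) (limit_long : Int) : List String :=
  if PySem.Chars.len rz.toList > limit_long then
    let rz_list := PySem.Chars.splitOn rz.toList [' ']
    let st := rz_list.foldl
      (fun (st : List Char × List Char × Int) word =>
        let long_string := st.2.2 + PySem.Chars.len word
        if long_string ≤ limit_long then
          (st.1 ++ word ++ [' '], st.2.1, long_string)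
        else
          (st.1, st.2.1 ++ word ++ [' '], long_string))
      ([], [], 0)
    [String.ofList st.1, String.ofList st.2.1]
  else
    [rz, ""]

-- ===== PORT B =====
-- Source B's break loop: first index whose running length-sum exceeds the limit (list length if none)
def prsCut (limit_long : Int) : List (List Char) → Int → Nat
  | [], _ => 0
  | w :: ws, total =>
    let t := total + PySem.Chars.len w
    if t > limit_long then 0 else prsCut limit_long ws t + 1

-- Source B's row(part): ' '.join(part) + ' ' if part else ''
def prsRow (part : List (List Char)) : List Char :=
  if part = [] then [] else PySem.Chars.join [' '] part ++ [' ']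

def process_razon_social_alt (rz : String) (limit_long : Int) : List String :=
  if PySem.Chars.len rz.toList ≤ limit_long then
    [rz, ""]
  else
    let words := PySem.Chars.splitOn rz.toList [' ']
    let cut := prsCut limit_long words 0
    [String.ofList (prsRow (words.take cut)), String.ofList (prsRow (words.drop cut))]

-- ===== PRECONDITION & SPEC =====
def Spec_process_razon_social (rz : String) (limit_long : Int) (out : List String) : Prop := out = process_razon_social_alt rz limit_long
instance (rz : String) (limit_long : Int) (out : List String) : Decidable (Spec_process_razon_social rz limit_long out) := by unfold Spec_process_razon_social; infer_instance

-- ===== CLAIM (what is proved, stated in full; the proofs are below) =====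
def Claim_equal_process_razon_social : Prop := ∀ (rz : String) (limit_long : Int), Dom_process_razon_social rz limit_long → Spec_process_razon_social rz limit_long (process_razon_social rz limit_long)

-- ===== LEMMAS AND PROOFS =====

-- each word contributes itself plus one trailing space
def prsJ (p : List (List Char)) : List Char := (p.map (fun w => w ++ [' '])).flatten

theorem prsRow_eq_prsJ (p : List (List Char)) : prsRow p = prsJ p := by
  induction p with
  | nil => simp [prsRow, prsJ]
  | cons w rest ih =>
    cases rest with
    | nil => simp [prsRow, prsJ, PySem.Chars.join_singleton]
    | cons r rs =>
      have h : PySem.Chars.join [' '] (r :: rs) ++ [' '] = prsJ (r :: rs) := by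
        simpa [prsRow] using ih
      calc prsRow (w :: r :: rs)
          = (w ++ [' '] ++ PySem.Chars.join [' '] (r :: rs)) ++ [' '] := by
            simp [prsRow, PySem.Chars.join_cons_cons]
        _ = w ++ [' '] ++ (PySem.Chars.join [' '] (r :: rs) ++ [' ']) := by simp
        _ = w ++ [' '] ++ prsJ (r :: rs) := by rw [h]
        _ = prsJ (w :: r :: rs) := by simp [prsJ]

def prsStep (limit_long : Int) (st : List Char × List Char × Int) (word : List Char) :
    List Char × List Char × Int :=
  let long_string := st.2.2 + PySem.Chars.len word
  if long_string ≤ limit_long then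
    (st.1 ++ word ++ [' '], st.2.1, long_string)
  else
    (st.1, st.2.1 ++ word ++ [' '], long_string)

def prsSum (ws : List (List Char)) : Int := (ws.map PySem.Chars.len).sum

-- phase 2: once the running total exceeds the limit, every word goes to the second row
theorem prs_fold_over (limit_long : Int) (ws : List (List Char)) :
    ∀ f s t, limit_long < t →
      ws.foldl (prsStep limit_long) (f, s, t) = (f, s ++ prsJ ws, t + prsSum ws) := by
  induction ws with
  | nil => intro f s t _; simp [prsJ, prsSum]
  | cons w rest ih =>
    intro f s t ht
    have hw : (0:Int) ≤ PySem.Chars.len w := by simp [PySem.Chars.len_eq]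
    have : ¬ (t + PySem.Chars.len w ≤ limit_long) := by omega
    simp only [List.foldl_cons, prsStep, if_neg this]
    rw [ih (f) (s ++ w ++ [' ']) (t + PySem.Chars.len w) (by omega)]
    simp [prsJ, prsSum]
    ring

theorem prs_fold_split (limit_long : Int) (ws : List (List Char)) :
    ∀ f t,
      ws.foldl (prsStep limit_long) (f, [], t) =
        (f ++ prsJ (ws.take (prsCut limit_long ws t)),
         prsJ (ws.drop (prsCut limit_long ws t)),
         t + prsSum ws) := by
  induction ws with
  | nil => intro f t; simp [prsCut, prsJ, prsSum]
  | cons w rest ih =>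
    intro f t
    by_cases h : t + PySem.Chars.len w ≤ limit_long
    · simp only [List.foldl_cons, prsStep, if_pos h, prsCut, if_neg (by omega : ¬ limit_long < t + PySem.Chars.len w)]
      rw [ih (f ++ w ++ [' ']) (t + PySem.Chars.len w)]
      simp [prsJ, prsSum]
      ring
    · simp only [List.foldl_cons, prsStep, if_neg h, prsCut,
        if_pos (by omega : limit_long < t + PySem.Chars.len w)]
      rw [prs_fold_over limit_long rest f (([]:List Char) ++ w ++ [' ']) _ (by omega)]
      simp [prsJ, prsSum]
      ring

-- bridge: port A's literal fold is the prefix/suffix split at the cut index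
theorem prsFoldA_eq (limit_long : Int) (ws : List (List Char)) :
    ws.foldl (fun (st : List Char × List Char × Int) word =>
        let long_string := st.2.2 + PySem.Chars.len word
        if long_string ≤ limit_long then (st.1 ++ word ++ [' '], st.2.1, long_string)
        else (st.1, st.2.1 ++ word ++ [' '], long_string)) ([], [], 0)
      = (prsJ (ws.take (prsCut limit_long ws 0)), prsJ (ws.drop (prsCut limit_long ws 0)),
         0 + prsSum ws) := by
  show ws.foldl (prsStep limit_long) ([], [], 0) = _
  rw [prs_fold_split]
  simp

-- ===== VERDICT (by name: the statement is the Claim_ definition above) =====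
theorem process_razon_social_spec : Claim_equal_process_razon_social := by
  intro rz limit_long _
  unfold Spec_process_razon_social process_razon_social process_razon_social_alt
  by_cases h : PySem.Chars.len rz.toList ≤ limit_long
  · rw [if_neg (by omega), if_pos h]
  · rw [if_pos (by omega), if_neg h]
    simp only [prsFoldA_eq, prsRow_eq_prsJ]
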